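-- pv_equiv track=rewrite | github.com/mwaboff/Proxy-Scraper | proxyscraper.py | recursiveXORdecode
-- ===== SOURCE A (Python) =====
-- def recursiveXORdecode(xorDict, akey):
--     """
--     Errr... I meant for winners!
--     """
--     if akey.isdigit():
--         return akey
--     avalue = xorDict[akey]
--     if avalue.isdigit():
--         return avalue
--     elif "^" in avalue:
--         avalue1, avalue2 = avalue.split("^")
--         answer = str(int(recursiveXORdecode(xorDict, avalue1)) ^ int(recursiveXORdecode(xorDict, avalue2)))
--         xorDict[akey] = answer
--         return answer
-- ===== SOURCE B (Python) =====
-- def recursiveXORdecode(xorDict, akey):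
--     # Iterative evaluator: explicit work stack + value stack instead of recursion.
--     # Like A, it caches computed answers back into xorDict (same mutation).
--     ops = [("eval", akey)]
--     vals = []
--     while ops:
--         tag, key = ops.pop()
--         if tag == "eval":
--             if key.isdigit():
--                 vals.append(key)
--                 continue
--             v = xorDict[key]
--             if v.isdigit():
--                 vals.append(v)
--             elif "^" in v:
--                 left, right = v.split("^")
--                 ops.append(("combine", key))
--                 ops.append(("eval", right))
--                 ops.append(("eval", left))
--             else:
--                 vals.append(None)
--         else:
--             b = int(vals.pop())
--             a = int(vals.pop())
--             answer = str(a ^ b)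
--             xorDict[key] = answer
--             vals.append(answer)
--     return vals.pop()
-- ===== Notes on version B (the rewrite author's own statement) =====
-- stated objective: alternative
-- what changed: Replaced A's recursion (memoized descent on the Python call stack) by an iterative evaluator driven by an explicit work stack and a value stack, preserving left-then-right operand order and the write-back caching.
import Mathlib
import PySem

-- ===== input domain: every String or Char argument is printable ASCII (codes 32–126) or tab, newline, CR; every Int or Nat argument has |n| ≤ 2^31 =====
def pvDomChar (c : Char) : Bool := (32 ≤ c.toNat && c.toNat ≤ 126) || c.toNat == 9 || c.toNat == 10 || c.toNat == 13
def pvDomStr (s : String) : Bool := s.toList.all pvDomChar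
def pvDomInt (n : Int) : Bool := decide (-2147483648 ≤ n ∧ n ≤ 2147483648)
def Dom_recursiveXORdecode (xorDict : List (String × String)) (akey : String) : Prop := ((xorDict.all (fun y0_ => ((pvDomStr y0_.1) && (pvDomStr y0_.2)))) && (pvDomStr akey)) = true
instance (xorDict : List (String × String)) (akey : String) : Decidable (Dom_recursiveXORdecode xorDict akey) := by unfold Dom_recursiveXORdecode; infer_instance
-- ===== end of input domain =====

-- B replaces A's recursion by an iterative evaluator with an explicit work stack and a value
-- stack (objective: alternative decomposition, same cost). Both A and B mutate xorDict in
-- place (caching computed answers); the equivalence proved here is about the RETURN value only.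

-- shared thin wrappers over the PySem primitives (used by both ports and by Pre_)
def pvIsDigit (s : String) : Bool := PySem.Str.strIsdigit s          -- s.isdigit()
def pvHasCaret (s : String) : Bool := PySem.Str.isIn "^" s           -- "^" in s
def pvSplitCaret (s : String) : Option (List String) := PySem.Str.split? s "^"   -- s.split("^")

-- ===== PORT A =====
-- A mutates xorDict (caches answers); the port threads the dict (PySem.Dict built from the
-- association list) through the recursion.  fuel makes the recursion total; on every input
-- Pre_ admits the recursion depth is at most the dict size + 1, so the fuel below never runs
-- out (CPython's own recursion limit is not modelled).
def goA : Nat → PySem.Dict String String → String →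
    Option String × PySem.Dict String String
  | 0, d, _ => (none, d)
  | fuel+1, d, akey =>
    if pvIsDigit akey then (some akey, d)
    else
      match d.get? akey with
      | none => (none, d)      -- KeyError (excluded by Pre_)
      | some avalue =>
        if pvIsDigit avalue then (some avalue, d)
        else if pvHasCaret avalue then
          match pvSplitCaret avalue with
          | some [a1, a2] =>
            match goA fuel d a1 with
            | (some r1, d1) =>
              match PySem.Int.ofStr? r1 with
              | none => (none, d1)     -- ValueError (excluded by Pre_)
              | some i1 =>
                match goA fuel d1 a2 with
                | (some r2, d2) =>
                  match PySem.Int.ofStr? r2 with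
                  | none => (none, d2)
                  | some i2 =>
                    let answer := PySem.Int.toStr (PySem.Int.bxor i1 i2)
                    (some answer, d2.insert akey answer)
                | (none, d2) => (none, d2)   -- int(None): TypeError (excluded by Pre_)
            | (none, d1) => (none, d1)
          | _ => (none, d)     -- split gave ≠ 2 parts: ValueError (excluded by Pre_)
        else (none, d)         -- falls off the function: Python returns None

def recursiveXORdecode (xorDict : List (String × String)) (akey : String) : Option String :=
  (goA ((PySem.Dict.ofList xorDict).items.length + 2) (PySem.Dict.ofList xorDict) akey).1

-- ===== PORT B =====
inductive PvTask
  | eval : String → PvTask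
  | combine : String → PvTask
deriving DecidableEq, Repr

-- B's while-loop; ops and vals are the two stacks (head = top), fuel counts loop iterations
-- (the Python loop runs freely; the fuel in the wrapper below is large enough to never run
-- out on any input Pre_ admits).
def goB : Nat → PySem.Dict String String → List PvTask → List (Option String) → Option String
  | 0, _, _, _ => none
  | fuel+1, d, ops, vals =>
    match ops with
    | [] =>
      match vals with
      | v :: _ => v             -- return vals.pop()
      | [] => none              -- vals.pop() on empty: IndexError (unreachable)
    | PvTask.eval key :: rest =>
      if pvIsDigit key then goB fuel d rest (some key :: vals)
      else
        match d.get? key with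
        | none => none          -- KeyError (excluded by Pre_)
        | some v =>
          if pvIsDigit v then goB fuel d rest (some v :: vals)
          else if pvHasCaret v then
            match pvSplitCaret v with
            | some [left, right] =>
              goB fuel d (PvTask.eval left :: PvTask.eval right :: PvTask.combine key :: rest) vals
            | _ => none         -- ValueError (excluded by Pre_)
          else goB fuel d rest (none :: vals)
    | PvTask.combine key :: rest =>
      match vals with
      | b? :: a? :: vals' =>
        match b?.bind PySem.Int.ofStr? with     -- b = int(vals.pop())
        | none => none                          -- TypeError/ValueError (excluded by Pre_)
        | some b =>
          match a?.bind PySem.Int.ofStr? with   -- a = int(vals.pop())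
          | none => none
          | some a =>
            let answer := PySem.Int.toStr (PySem.Int.bxor a b)
            goB fuel (d.insert key answer) rest (some answer :: vals')
      | _ => none               -- IndexError (unreachable)

def recursiveXORdecode_alt (xorDict : List (String × String)) (akey : String) : Option String :=
  goB (4 ^ ((PySem.Dict.ofList xorDict).items.length + 2) + 1) (PySem.Dict.ofList xorDict)
    [PvTask.eval akey] []

-- ===== PRECONDITION & SPEC =====
-- the digit-grounded dependency closure of the dict: okTok ks t says token t is digits or an
-- already-grounded key; goodVal ks v says value v is digits or a two-part '^'-split of such
-- tokens; goodKeys iterates this closure (it is stable after |items| rounds).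
def okTok (ks : List String) (t : String) : Bool := pvIsDigit t || ks.contains t

def goodVal (ks : List String) (v : String) : Bool :=
  pvIsDigit v ||
    (pvHasCaret v &&
      (match pvSplitCaret v with
       | some [a, b] => okTok ks a && okTok ks b
       | _ => false))

def stepKeys (items : List (String × String)) (ks : List String) : List String :=
  (items.filter (fun p => goodVal ks p.2)).map (fun p => p.1)

def goodKeys (items : List (String × String)) : Nat → List String
  | 0 => []
  | n+1 => stepKeys items (goodKeys items n)

-- Pre_ excludes exactly the inputs on which Python A raises: a missing key (KeyError), a
-- '^'-split with other than two parts (ValueError), an operand chain reaching a caret-free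
-- non-digit value (TypeError on int(None)) or a missing key, and cyclic chains
-- (RecursionError): akey must be digits, or its stored value digits or caret-free, or akey
-- must lie in the digit-grounded dependency closure of the dict.
def Pre_recursiveXORdecode (xorDict : List (String × String)) (akey : String) : Prop :=
  (pvIsDigit akey ||
    (match (PySem.Dict.ofList xorDict).get? akey with
     | none => false
     | some v =>
       pvIsDigit v || !pvHasCaret v ||
         (goodKeys (PySem.Dict.ofList xorDict).items
             ((PySem.Dict.ofList xorDict).items.length + 1)).contains akey)) = true

instance (xorDict : List (String × String)) (akey : String) :
    Decidable (Pre_recursiveXORdecode xorDict akey) := by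
  unfold Pre_recursiveXORdecode; infer_instance

def pvWitness_recursiveXORdecode : (List (String × String)) × String :=
  ([("k", "a^5"), ("a", "3")], "k")

def Spec_recursiveXORdecode (xorDict : List (String × String)) (akey : String) (out : Option String) : Prop := out = recursiveXORdecode_alt xorDict akey
instance (xorDict : List (String × String)) (akey : String) (out : Option String) : Decidable (Spec_recursiveXORdecode xorDict akey out) := by unfold Spec_recursiveXORdecode; infer_instance

-- ===== CLAIM (what is proved, stated in full; the proofs are below) =====
def Claim_equal_recursiveXORdecode : Prop := ∀ (xorDict : List (String × String)) (akey : String), Dom_recursiveXORdecode xorDict akey → Pre_recursiveXORdecode xorDict akey → Spec_recursiveXORdecode xorDict akey (recursiveXORdecode xorDict akey)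

-- ===== LEMMAS AND PROOFS =====


-- ---------- generic step lemmas for the two ports ----------

theorem goA_digit (fuel : Nat) (d : PySem.Dict String String) (t : String)
    (h : pvIsDigit t = true) : goA (fuel + 1) d t = (some t, d) := by
  conv_lhs => rw [goA.eq_def]
  simp [h]

theorem goA_value (fuel : Nat) (d : PySem.Dict String String) (t v : String)
    (hd : pvIsDigit t = false) (hget : d.get? t = some v) (hv : pvIsDigit v = true) :
    goA (fuel + 1) d t = (some v, d) := by
  conv_lhs => rw [goA.eq_def]
  simp [hd, hget, hv]

theorem goA_nocaret (fuel : Nat) (d : PySem.Dict String String) (t v : String)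
    (hd : pvIsDigit t = false) (hget : d.get? t = some v) (hv : pvIsDigit v = false)
    (hc : pvHasCaret v = false) : goA (fuel + 1) d t = (none, d) := by
  conv_lhs => rw [goA.eq_def]
  simp [hd, hget, hv, hc]

theorem goB_done (fuel : Nat) (d : PySem.Dict String String) (v : Option String)
    (vals : List (Option String)) : goB (fuel + 1) d [] (v :: vals) = v := by
  conv_lhs => rw [goB.eq_def]

theorem goB_evalDigit (fuel : Nat) (d : PySem.Dict String String) (t : String)
    (rest : List PvTask) (vals : List (Option String)) (h : pvIsDigit t = true) :
    goB (fuel + 1) d (PvTask.eval t :: rest) vals = goB fuel d rest (some t :: vals) := by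
  conv_lhs => rw [goB.eq_def]
  simp [h]

theorem goB_evalValue (fuel : Nat) (d : PySem.Dict String String) (t v : String)
    (rest : List PvTask) (vals : List (Option String)) (hd : pvIsDigit t = false)
    (hget : d.get? t = some v) (hv : pvIsDigit v = true) :
    goB (fuel + 1) d (PvTask.eval t :: rest) vals = goB fuel d rest (some v :: vals) := by
  conv_lhs => rw [goB.eq_def]
  simp [hd, hget, hv]

theorem goB_evalExpr (fuel : Nat) (d : PySem.Dict String String) (t v a b : String)
    (rest : List PvTask) (vals : List (Option String)) (hd : pvIsDigit t = false)
    (hget : d.get? t = some v) (hv : pvIsDigit v = false) (hc : pvHasCaret v = true)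
    (hs : pvSplitCaret v = some [a, b]) :
    goB (fuel + 1) d (PvTask.eval t :: rest) vals
      = goB fuel d (PvTask.eval a :: PvTask.eval b :: PvTask.combine t :: rest) vals := by
  conv_lhs => rw [goB.eq_def]
  simp [hd, hget, hv, hc, hs]

theorem goB_evalNone (fuel : Nat) (d : PySem.Dict String String) (t v : String)
    (rest : List PvTask) (vals : List (Option String)) (hd : pvIsDigit t = false)
    (hget : d.get? t = some v) (hv : pvIsDigit v = false) (hc : pvHasCaret v = false) :
    goB (fuel + 1) d (PvTask.eval t :: rest) vals = goB fuel d rest (none :: vals) := by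
  conv_lhs => rw [goB.eq_def]
  simp [hd, hget, hv, hc]

theorem goB_combine (fuel : Nat) (d : PySem.Dict String String) (t r1 r2 : String)
    (i1 i2 : Int) (rest : List PvTask) (vals : List (Option String))
    (h1 : PySem.Int.ofStr? r1 = some i1) (h2 : PySem.Int.ofStr? r2 = some i2) :
    goB (fuel + 1) d (PvTask.combine t :: rest) (some r2 :: some r1 :: vals)
      = goB fuel (d.insert t (PySem.Int.toStr (PySem.Int.bxor i1 i2))) rest
          (some (PySem.Int.toStr (PySem.Int.bxor i1 i2)) :: vals) := by
  conv_lhs => rw [goB.eq_def]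
  simp [h1, h2]

-- ---------- int(s) on digit strings and str(n) of non-negative ints ----------
-- PySem.Int.ofChars? delegates to a private helper; pvIntGo/pvIntDigits?/pvIntOfChars?
-- replicate it and pvOfChars_eq proves the replica pointwise equal, so facts about int(s)
-- can be proved against the replica.

def pvIntGo : List Char → Bool → Nat → Option Nat
  | [], afterDigit, acc => if afterDigit = true then some acc else none
  | c :: rest, afterDigit, acc =>
    if c.isDigit = true then pvIntGo rest true (acc * 10 + (c.toNat - '0'.toNat))
    else
      if c = '_' ∧ afterDigit = true then
        match rest with
        | d :: _ => if d.isDigit = true then pvIntGo rest false acc else none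
        | [] => none
      else none

def pvIntDigits? : List Char → Option Nat
  | [] => none
  | cs => pvIntGo cs false 0

def pvIntOfChars? : List Char → Option Int := fun s =>
  have cs := (List.dropWhile PySem.Int.isIntSpace (List.dropWhile PySem.Int.isIntSpace s).reverse).reverse
  match cs with
  | '-' :: ds => Option.map (fun n => -n) (do let a ← pvIntDigits? ds; pure (a : Int))
  | '+' :: ds => Option.map (fun n => n) (do let a ← pvIntDigits? ds; pure (a : Int))
  | ds => Option.map (fun n => n) (do let a ← pvIntDigits? ds; pure (a : Int))

theorem pvIntGo_ext (g : List Char → Bool → Nat → Option Nat)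
    (h0 : ∀ b n, g [] b n = if b = true then some n else none)
    (h1 : ∀ c rest b n, g (c :: rest) b n =
      if c.isDigit = true then g rest true (n * 10 + (c.toNat - '0'.toNat))
      else if c = '_' ∧ b = true then
        (match rest with
         | d :: _ => if d.isDigit = true then g rest false n else none
         | [] => none)
      else none) :
    ∀ us b n, g us b n = pvIntGo us b n := by
  intro us
  induction us with
  | nil => intro b n; rw [h0]; rfl
  | cons c rest ih =>
    intro b n
    rw [h1]
    rw [pvIntGo.eq_def]
    cases rest with
    | nil => simp [ih]
    | cons d tail => simp [ih]

theorem pvOfChars_eq (us : List Char) : PySem.Int.ofChars? us = pvIntOfChars? us := by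
  unfold PySem.Int.ofChars? pvIntOfChars?
  generalize (List.dropWhile PySem.Int.isIntSpace (List.dropWhile PySem.Int.isIntSpace us).reverse).reverse = ds
  dsimp only
  split
  case h_1 vs =>
    congr 1
    congr 1
    cases vs with
    | nil => rfl
    | cons c t =>
      rw [show pvIntDigits? (c :: t) = pvIntGo (c :: t) false 0 from rfl, pvIntGo.eq_def]
      conv_lhs => whnf
      cases instDecidableEqBool c.isDigit true with
      | isTrue h =>
        simp only [h, if_true]
        refine pvIntGo_ext _ ?_ ?_ t true (0 * 10 + (c.toNat - '0'.toNat))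
        · intro b n; rfl
        · intro c' r b n; rfl
      | isFalse h =>
        simp only [h, if_false]
        simp
  case h_2 vs =>
    congr 1
    congr 1
    cases vs with
    | nil => rfl
    | cons c t =>
      rw [show pvIntDigits? (c :: t) = pvIntGo (c :: t) false 0 from rfl, pvIntGo.eq_def]
      conv_lhs => whnf
      cases instDecidableEqBool c.isDigit true with
      | isTrue h =>
        simp only [h, if_true]
        refine pvIntGo_ext _ ?_ ?_ t true (0 * 10 + (c.toNat - '0'.toNat))
        · intro b n; rfl
        · intro c' r b n; rfl
      | isFalse h =>
        simp only [h, if_false]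
        simp
  case h_3 hn1 hn2 =>
    split
    · rename_i vs
      exfalso; exact hn1 vs rfl
    · rename_i vs
      exfalso; exact hn2 vs rfl
    · congr 1
      congr 1
      cases ds with
      | nil => rfl
      | cons c t =>
        rw [show pvIntDigits? (c :: t) = pvIntGo (c :: t) false 0 from rfl, pvIntGo.eq_def]
        conv_lhs => whnf
        cases instDecidableEqBool c.isDigit true with
        | isTrue h =>
          simp only [h, if_true]
          refine pvIntGo_ext _ ?_ ?_ t true (0 * 10 + (c.toNat - '0'.toNat))
          · intro b n; rfl
          · intro c' r b n; rfl
        | isFalse h =>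
          simp only [h, if_false]
          simp

theorem isdigit_iff_isDigit (c : Char) : PySem.Chars.isdigit c = true ↔ c.isDigit = true := by
  unfold PySem.Chars.isdigit Char.isDigit
  simp [Char.le_def]

theorem isIntSpace_of_digit (c : Char) (h : PySem.Chars.isdigit c = true) :
    PySem.Int.isIntSpace c = false := by
  unfold PySem.Int.isIntSpace
  simp only [Bool.or_eq_false_iff, decide_eq_false_iff_not]
  refine ⟨⟨⟨⟨⟨?_, ?_⟩, ?_⟩, ?_⟩, ?_⟩, ?_⟩ <;> (rintro rfl; simp [PySem.Chars.isdigit] at h)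

theorem dropWhile_space_of_digits (cs : List Char) (h : cs.all PySem.Chars.isdigit = true) :
    cs.dropWhile PySem.Int.isIntSpace = cs := by
  cases cs with
  | nil => rfl
  | cons c t =>
    simp only [List.all_cons, Bool.and_eq_true] at h
    simp [isIntSpace_of_digit c h.1]

theorem pvIntGo_digits (cs : List Char) (h : cs.all PySem.Chars.isdigit = true) :
    ∀ n : Nat, ∃ m : Nat, pvIntGo cs true n = some m := by
  induction cs with
  | nil => intro n; exact ⟨n, rfl⟩
  | cons c t ih =>
    intro n
    simp only [List.all_cons, Bool.and_eq_true] at h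
    have hc : c.isDigit = true := (isdigit_iff_isDigit c).mp h.1
    rw [pvIntGo.eq_def]
    simp only [hc, if_true]
    exact ih h.2 _

theorem parse_digits (s : String) (h : pvIsDigit s = true) :
    ∃ k : Int, PySem.Int.ofStr? s = some k ∧ 0 ≤ k := by
  have h' : PySem.Chars.strIsdigit s.toList = true := by
    rw [← PySem.Str.strIsdigit_eq]; exact h
  unfold PySem.Chars.strIsdigit at h'
  rw [Bool.and_eq_true] at h'
  obtain ⟨hne, hall⟩ := h'
  show ∃ k, PySem.Int.ofChars? s.toList = some k ∧ 0 ≤ k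
  rw [pvOfChars_eq]
  unfold pvIntOfChars?
  have h1 : (s.toList.dropWhile PySem.Int.isIntSpace) = s.toList :=
    dropWhile_space_of_digits _ hall
  have hallrev : s.toList.reverse.all PySem.Chars.isdigit = true := by
    simpa using hall
  have h2 : (s.toList.reverse.dropWhile PySem.Int.isIntSpace) = s.toList.reverse :=
    dropWhile_space_of_digits _ hallrev
  rw [h1, h2, List.reverse_reverse]
  cases hcs : s.toList with
  | nil => rw [hcs] at hne; simp at hne
  | cons c t =>
    rw [hcs] at hall
    simp only [List.all_cons, Bool.and_eq_true] at hall
    have hcd : c.isDigit = true := (isdigit_iff_isDigit c).mp hall.1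
    have hgo : ∃ m : Nat, pvIntDigits? (c :: t) = some m := by
      rw [show pvIntDigits? (c :: t) = pvIntGo (c :: t) false 0 from rfl, pvIntGo.eq_def]
      simp only [hcd, if_true]
      exact pvIntGo_digits t hall.2 _
    obtain ⟨m, hm⟩ := hgo
    dsimp only
    split
    · rename_i ds heq
      exfalso
      rw [List.cons.injEq] at heq
      rw [heq.1] at hcd
      exact absurd hcd (by decide)
    · rename_i ds heq
      exfalso
      rw [List.cons.injEq] at heq
      rw [heq.1] at hcd
      exact absurd hcd (by decide)
    · exact ⟨(m : Int), by rw [hm]; rfl, Int.natCast_nonneg m⟩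

theorem toStr_digits (k : Int) (hk : 0 ≤ k) : pvIsDigit (PySem.Int.toStr k) = true := by
  unfold pvIsDigit
  rw [PySem.Str.strIsdigit_eq, PySem.Int.toList_toStr]
  unfold PySem.Int.toChars
  rw [if_neg (by omega)]
  unfold PySem.Chars.strIsdigit
  rw [Bool.and_eq_true]
  constructor
  · cases hE : (Nat.toDigits 10 k.toNat).isEmpty with
    | false => rfl
    | true =>
      exfalso
      rw [List.isEmpty_iff] at hE
      have := @Nat.length_toDigits_pos 10 k.toNat
      rw [hE] at this
      simp at this
  · rw [List.all_eq_true]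
    intro c hc
    exact (isdigit_iff_isDigit c).mpr
      (Nat.isDigit_of_mem_toDigits (by norm_num) (le_refl 10) hc)

theorem bxor_nonneg (a b : Int) (ha : 0 ≤ a) (hb : 0 ≤ b) : 0 ≤ PySem.Int.bxor a b := by
  rw [PySem.Int.bxor_of_nonneg ha hb]
  exact Int.natCast_nonneg _

-- ---------- digit-overwrite refinement of the dict ----------

def pvRefines (d d' : PySem.Dict String String) : Prop :=
  d'.items.length = d.items.length ∧
  ∀ (i : Nat) (h : i < d.items.length) (h' : i < d'.items.length),
    (d'.items[i]'h').1 = (d.items[i]'h).1 ∧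
    ((d'.items[i]'h').2 = (d.items[i]'h).2 ∨ pvIsDigit (d'.items[i]'h').2 = true)

theorem pvRefines_refl (d : PySem.Dict String String) : pvRefines d d :=
  ⟨rfl, fun _ _ _ => ⟨rfl, Or.inl rfl⟩⟩

theorem pvRefines_trans {d1 d2 d3 : PySem.Dict String String}
    (h12 : pvRefines d1 d2) (h23 : pvRefines d2 d3) : pvRefines d1 d3 := by
  obtain ⟨hl12, h12⟩ := h12
  obtain ⟨hl23, h23⟩ := h23
  refine ⟨hl23.trans hl12, fun i h h' => ?_⟩
  have h2 : i < d2.items.length := by omega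
  obtain ⟨hk12, hv12⟩ := h12 i h h2
  obtain ⟨hk23, hv23⟩ := h23 i h2 h'
  refine ⟨hk23.trans hk12, ?_⟩
  rcases hv23 with hv23 | hv23
  · rcases hv12 with hv12 | hv12
    · exact Or.inl (hv23.trans hv12)
    · exact Or.inr (hv23 ▸ hv12)
  · exact Or.inr hv23

theorem pvRefines_keys {d d' : PySem.Dict String String} (h : pvRefines d d') :
    d'.keys = d.keys := by
  obtain ⟨hl, hi⟩ := h
  simp only [PySem.Dict.keys]
  apply List.ext_getElem
  · simpa using hl
  · intro i h1 h2
    simp only [List.getElem_map]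
    exact (hi i (by simpa using h2) (by simpa using h1)).1

theorem pvRefines_insert (d : PySem.Dict String String) (k v : String)
    (hc : d.contains k = true) (hv : pvIsDigit v = true) :
    pvRefines d (d.insert k v) := by
  have hitems : (d.insert k v).items
      = d.items.map (fun p => if p.1 == k then (k, v) else p) :=
    PySem.Dict.items_insert_of_contains d v hc
  refine ⟨by rw [hitems]; simp, fun i h h' => ?_⟩
  rw [List.getElem_of_eq hitems h', List.getElem_map]
  split
  · rename_i heq
    exact ⟨(eq_of_beq heq).symm, Or.inr hv⟩
  · exact ⟨rfl, Or.inl rfl⟩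

-- ---------- the dependency closure and refinement ----------

theorem okTok_mono {ks ks' : List String} (hsub : ∀ x ∈ ks, x ∈ ks') (t : String)
    (h : okTok ks t = true) : okTok ks' t = true := by
  unfold okTok at *
  rcases Bool.or_eq_true_iff.mp h with h | h
  · exact Bool.or_eq_true_iff.mpr (Or.inl h)
  · refine Bool.or_eq_true_iff.mpr (Or.inr ?_)
    simp only [List.contains_iff_mem] at *
    exact hsub _ h

theorem goodVal_mono {ks ks' : List String} (hsub : ∀ x ∈ ks, x ∈ ks') (v : String)
    (h : goodVal ks v = true) : goodVal ks' v = true := by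
  unfold goodVal at *
  rcases Bool.or_eq_true_iff.mp h with h | h
  · exact Bool.or_eq_true_iff.mpr (Or.inl h)
  · refine Bool.or_eq_true_iff.mpr (Or.inr ?_)
    rw [Bool.and_eq_true] at h ⊢
    refine ⟨h.1, ?_⟩
    rcases h with ⟨-, h⟩
    split at h
    · rename_i a b heq
      rw [Bool.and_eq_true] at h ⊢
      exact ⟨okTok_mono hsub a h.1, okTok_mono hsub b h.2⟩
    · exact absurd h (by simp)

theorem mem_stepKeys {items : List (String × String)} {ks : List String} {x : String} :
    x ∈ stepKeys items ks ↔ ∃ p ∈ items, goodVal ks p.2 = true ∧ p.1 = x := by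
  unfold stepKeys
  constructor
  · intro hx
    obtain ⟨p, hp, rfl⟩ := List.mem_map.mp hx
    exact ⟨p, (List.mem_filter.mp hp).1, (List.mem_filter.mp hp).2, rfl⟩
  · rintro ⟨p, hp, hg, rfl⟩
    exact List.mem_map.mpr ⟨p, List.mem_filter.mpr ⟨hp, hg⟩, rfl⟩

theorem pvRefines_goodKeys {d d' : PySem.Dict String String} (h : pvRefines d d') :
    ∀ (n : Nat) (x : String), x ∈ goodKeys d.items n → x ∈ goodKeys d'.items n := by
  intro n
  induction n with
  | zero => intro x hx; exact absurd hx (by simp [goodKeys])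
  | succ n ih =>
    intro x hx
    obtain ⟨hlen, hidx⟩ := h
    rw [goodKeys] at hx ⊢
    rw [mem_stepKeys] at hx ⊢
    obtain ⟨p, hp, hg, hx⟩ := hx
    obtain ⟨i, hi, hpi⟩ := List.mem_iff_getElem.mp hp
    have hi' : i < d'.items.length := by omega
    obtain ⟨hk, hv⟩ := hidx i hi hi'
    refine ⟨d'.items[i]'hi', List.getElem_mem hi', ?_, by rw [hk, hpi, hx]⟩
    rcases hv with hv | hv
    · rw [hv, hpi]
      exact goodVal_mono ih p.2 hg
    · unfold goodVal
      rw [hv]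
      rfl

theorem goodKeys_lookup {d : PySem.Dict String String} {t : String} {n : Nat}
    (hnd : d.keys.Nodup) (hmem : t ∈ goodKeys d.items (n + 1)) :
    ∃ v, d.get? t = some v ∧ goodVal (goodKeys d.items n) v = true := by
  rw [goodKeys, mem_stepKeys] at hmem
  obtain ⟨p, hp, hg, hx⟩ := hmem
  refine ⟨p.2, ?_, hg⟩
  have : (t, p.2) ∈ d.items := by rw [← hx]; exact hp
  exact PySem.Dict.get?_of_mem_items d this hnd

theorem goodVal_cases {ks : List String} {v : String} (h : goodVal ks v = true)
    (hv : pvIsDigit v = false) :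
    pvHasCaret v = true ∧ ∃ a b, pvSplitCaret v = some [a, b] ∧
      okTok ks a = true ∧ okTok ks b = true := by
  unfold goodVal at h
  rw [hv, Bool.false_or, Bool.and_eq_true] at h
  refine ⟨h.1, ?_⟩
  rcases h with ⟨-, h⟩
  split at h
  · rename_i a b heq
    rw [Bool.and_eq_true] at h
    exact ⟨a, b, heq, h.1, h.2⟩
  · exact absurd h (by simp)

theorem okTok_cases {ks : List String} {t : String} (h : okTok ks t = true) :
    pvIsDigit t = true ∨ t ∈ ks := by
  unfold okTok at h
  rcases Bool.or_eq_true_iff.mp h with h | h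
  · exact Or.inl h
  · exact Or.inr (by simpa [List.contains_iff_mem] using h)

-- ---------- the simulation lemma: both ports resolve a grounded token identically ----------

theorem pvSIM : ∀ (n : Nat) (d : PySem.Dict String String) (t : String),
    d.keys.Nodup →
    (pvIsDigit t || (goodKeys d.items n).contains t) = true →
    ∃ (r : String) (d' : PySem.Dict String String) (cost : Nat),
      pvIsDigit r = true ∧ pvRefines d d' ∧ cost + 1 ≤ 4 ^ (n + 1) ∧
      (∀ fa : Nat, goA (fa + n + 1) d t = (some r, d')) ∧
      (∀ (fb : Nat) (rest : List PvTask) (vals : List (Option String)),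
        goB (fb + cost) d (PvTask.eval t :: rest) vals = goB fb d' rest (some r :: vals)) := by
  intro n
  induction n with
  | zero =>
    intro d t hnd hok
    have hd : pvIsDigit t = true := by simpa [goodKeys] using hok
    refine ⟨t, d, 1, hd, pvRefines_refl d, by norm_num, ?_, ?_⟩
    · intro fa
      exact goA_digit (fa + 0) d t hd
    · intro fb rest vals
      exact goB_evalDigit fb d t rest vals hd
  | succ n ih =>
    intro d t hnd hok
    have h4big : 2 ≤ 4 ^ (n + 1 + 1) := by
      have := Nat.pow_le_pow_right (show 1 ≤ 4 by norm_num) (show 1 ≤ n + 1 + 1 by omega)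
      simpa using this.trans' (by norm_num)
    by_cases hd : pvIsDigit t = true
    · refine ⟨t, d, 1, hd, pvRefines_refl d, h4big, ?_, ?_⟩
      · intro fa
        exact goA_digit (fa + (n + 1)) d t hd
      · intro fb rest vals
        exact goB_evalDigit fb d t rest vals hd
    · have hd' : pvIsDigit t = false := by simpa using hd
      have hmem : t ∈ goodKeys d.items (n + 1) := by
        rcases Bool.or_eq_true_iff.mp hok with h | h
        · exact absurd h hd
        · simpa [List.contains_iff_mem] using h
      obtain ⟨v, hget, hgv⟩ := goodKeys_lookup hnd hmem
      by_cases hv : pvIsDigit v = true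
      · refine ⟨v, d, 1, hv, pvRefines_refl d, h4big, ?_, ?_⟩
        · intro fa
          exact goA_value (fa + (n + 1)) d t v hd' hget hv
        · intro fb rest vals
          exact goB_evalValue fb d t v rest vals hd' hget hv
      · have hv' : pvIsDigit v = false := by simpa using hv
        obtain ⟨hc, a, b, hs, hta, htb⟩ := goodVal_cases hgv hv'
        have hokA : (pvIsDigit a || (goodKeys d.items n).contains a) = true := hta
        obtain ⟨r1, d1, c1, hr1, href1, hc1, hA1, hB1⟩ := ih d a hnd hokA
        obtain ⟨i1, hofs1, hi1nn⟩ := parse_digits r1 hr1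
        have hnd1 : d1.keys.Nodup := by rw [pvRefines_keys href1]; exact hnd
        have hokB : (pvIsDigit b || (goodKeys d1.items n).contains b) = true := by
          rcases okTok_cases htb with h | h
          · simp [h]
          · simp [pvRefines_goodKeys href1 n b h]
        obtain ⟨r2, d2, c2, hr2, href2, hc2, hA2, hB2⟩ := ih d1 b hnd1 hokB
        obtain ⟨i2, hofs2, hi2nn⟩ := parse_digits r2 hr2
        have hansd : pvIsDigit (PySem.Int.toStr (PySem.Int.bxor i1 i2)) = true :=
          toStr_digits _ (bxor_nonneg _ _ hi1nn hi2nn)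
        have hcont : d2.contains t = true := by
          rw [PySem.Dict.contains_iff_mem_keys, pvRefines_keys href2, pvRefines_keys href1,
            ← PySem.Dict.contains_iff_mem_keys, PySem.Dict.contains_eq_isSome_get?, hget]
          rfl
        have hrefI : pvRefines d2 (d2.insert t (PySem.Int.toStr (PySem.Int.bxor i1 i2))) :=
          pvRefines_insert d2 t _ hcont hansd
        refine ⟨PySem.Int.toStr (PySem.Int.bxor i1 i2),
          d2.insert t (PySem.Int.toStr (PySem.Int.bxor i1 i2)), c1 + c2 + 2, hansd,
          pvRefines_trans (pvRefines_trans href1 href2) hrefI, ?_, ?_, ?_⟩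
        · have he : (4:Nat) ^ (n + 1 + 1) = 4 * 4 ^ (n + 1) := by ring
          omega
        · intro fa
          rw [show fa + (n + 1) + 1 = (fa + n + 1) + 1 from by omega]
          conv_lhs => rw [goA.eq_def]
          simp only [hd', hget, hv', hc, hs, Bool.false_eq_true, if_false, if_true]
          rw [hA1 fa]
          simp only [hofs1]
          rw [hA2 fa]
          simp only [hofs2]
        · intro fb rest vals
          rw [show fb + (c1 + c2 + 2) = ((fb + 1 + c2) + c1) + 1 from by omega]
          rw [goB_evalExpr _ d t v a b _ _ hd' hget hv' hc hs]
          rw [hB1 (fb + 1 + c2)]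
          rw [hB2 (fb + 1)]
          rw [goB_combine fb d2 t r1 r2 i1 i2 rest vals hofs1 hofs2]



-- ===== VERDICT (by name: the statement is the Claim_ definition above) =====
theorem recursiveXORdecode_spec : Claim_equal_recursiveXORdecode := by
  intro xorDict akey _ hpre
  unfold Spec_recursiveXORdecode recursiveXORdecode recursiveXORdecode_alt
  unfold Pre_recursiveXORdecode at hpre
  set d := PySem.Dict.ofList xorDict with hdd
  have hnd : d.keys.Nodup := PySem.Dict.nodup_keys_ofList xorDict
  set L := d.items.length with hL
  have hFB2 : 2 ≤ 4 ^ (L + 2) := by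
    have := Nat.pow_le_pow_right (show 1 ≤ 4 by norm_num) (show 1 ≤ L + 2 by omega)
    simpa using this.trans' (by norm_num)
  by_cases hok : (pvIsDigit akey || (goodKeys d.items (L + 1)).contains akey) = true
  · obtain ⟨r, d', cost, hr, href, hcost, hA, hB⟩ := pvSIM (L + 1) d akey hnd hok
    have hAeq : goA (L + 2) d akey = (some r, d') := by
      rw [show L + 2 = 0 + (L + 1) + 1 from by omega]
      exact hA 0
    have h4 : cost + 1 ≤ 4 ^ (L + 2) := by
      rw [show L + 2 = L + 1 + 1 from by omega]
      exact hcost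
    rw [hAeq]
    rw [show (4 ^ (L + 2) + 1 : Nat) = (4 ^ (L + 2) + 1 - cost) + cost from by omega]
    rw [hB (4 ^ (L + 2) + 1 - cost)]
    rw [show (4 ^ (L + 2) + 1 - cost : Nat) = (4 ^ (L + 2) - cost) + 1 from by omega]
    rw [goB_done]
  · have hok' : (pvIsDigit akey || (goodKeys d.items (L + 1)).contains akey) = false :=
      Bool.eq_false_iff.mpr hok
    rw [Bool.or_eq_false_iff] at hok'
    obtain ⟨hdk, hcontf⟩ := hok'
    cases hget : d.get? akey with
    | none =>
      rw [hget] at hpre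
      simp [hdk] at hpre
    | some v =>
      rw [hget] at hpre
      simp only [hdk, Bool.false_or] at hpre
      rw [hcontf, Bool.or_false] at hpre
      by_cases hv : pvIsDigit v = true
      · rw [show L + 2 = (L + 1) + 1 from by omega, goA_value (L + 1) d akey v hdk hget hv]
        rw [show (4 ^ (L + 2) + 1 : Nat) = ((4 ^ (L + 2) - 1) + 1) + 1 from by omega,
          goB_evalValue _ d akey v [] [] hdk hget hv,
          show (4 ^ (L + 2) - 1 : Nat) = (4 ^ (L + 2) - 2) + 1 from by omega,
          goB_done]
      · have hv' : pvIsDigit v = false := by simpa using hv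
        have hnc : pvHasCaret v = false := by
          rw [hv', Bool.false_or] at hpre
          simpa using hpre
        rw [show L + 2 = (L + 1) + 1 from by omega, goA_nocaret (L + 1) d akey v hdk hget hv' hnc]
        rw [show (4 ^ (L + 2) + 1 : Nat) = ((4 ^ (L + 2) - 1) + 1) + 1 from by omega,
          goB_evalNone _ d akey v [] [] hdk hget hv' hnc,
          show (4 ^ (L + 2) - 1 : Nat) = (4 ^ (L + 2) - 2) + 1 from by omega,
          goB_done]
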